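-- pv_equiv track=rewrite | github.com/yuriikakhutov/crypto | solve.py | column_words
-- ===== SOURCE A (Python) =====
-- from typing import Iterable, List, Sequence, Tuple
--
-- def column_words(triplets: Sequence[str]) -> List[str]:
--     words: List[str] = []
--     for column in range(3):
--         word = "".join(
--             triplet[column] for triplet in triplets if len(triplet) > column
--         )
--         words.append(word)
--     return words
-- ===== SOURCE B (Python) =====
-- def column_words(triplets):
--     col0, col1, col2 = [], [], []
--     for t in triplets:
--         if len(t) > 0:
--             col0.append(t[0])
--         if len(t) > 1:
--             col1.append(t[1])
--         if len(t) > 2: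
--             col2.append(t[2])
--     return ["".join(col0), "".join(col1), "".join(col2)]
-- ===== Notes on version B (the rewrite author's own statement) =====
-- stated objective: alternative
-- what changed: Replaces A's three per-column scans (a join over the whole list for each column index 0..2) by a single pass over the triplets that fills three column accumulators at once.
import Mathlib
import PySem

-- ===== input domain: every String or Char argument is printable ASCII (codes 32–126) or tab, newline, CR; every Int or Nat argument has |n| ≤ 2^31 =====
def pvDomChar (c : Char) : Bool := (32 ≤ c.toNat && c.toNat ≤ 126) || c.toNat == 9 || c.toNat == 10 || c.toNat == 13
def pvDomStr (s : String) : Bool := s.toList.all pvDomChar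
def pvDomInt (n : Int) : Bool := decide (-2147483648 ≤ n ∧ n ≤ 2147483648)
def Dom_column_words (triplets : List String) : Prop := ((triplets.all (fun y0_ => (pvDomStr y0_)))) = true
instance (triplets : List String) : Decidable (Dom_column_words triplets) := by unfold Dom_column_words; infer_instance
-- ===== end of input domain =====

-- B replaces A's three per-column scans by one pass filling three column accumulators; return value only.

-- ===== PORT A =====
-- for column in range(3): join triplet[column] over triplets with len(triplet) > column
def column_words (triplets : List String) : List String :=
  (PySem.List.pyRange 0 3 1).foldl (fun words column =>
    let word := String.ofList
      ((triplets.filter (fun tr => decide (PySem.Str.len tr > column))).map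
        (fun tr => (PySem.Str.pyGet? tr column).getD ' '))
    words ++ [word]) []

-- ===== PORT B =====
-- one pass over the triplets; each step conditionally extends the three accumulators
def column_words_alt (triplets : List String) : List String :=
  let cols := triplets.foldl
    (fun (c : List Char × List Char × List Char) t =>
      let l := t.toList
      let c0 := if l.length > 0 then c.1 ++ [(PySem.List.pyGet? l 0).getD ' '] else c.1
      let c1 := if l.length > 1 then c.2.1 ++ [(PySem.List.pyGet? l 1).getD ' '] else c.2.1
      let c2 := if l.length > 2 then c.2.2 ++ [(PySem.List.pyGet? l 2).getD ' '] else c.2.2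
      (c0, c1, c2))
    ([], [], [])
  [String.ofList cols.1, String.ofList cols.2.1, String.ofList cols.2.2]

-- ===== PRECONDITION & SPEC =====
def Spec_column_words (triplets : List String) (out : List String) : Prop := out = column_words_alt triplets
instance (triplets : List String) (out : List String) : Decidable (Spec_column_words triplets out) := by unfold Spec_column_words; infer_instance

-- ===== CLAIM (what is proved, stated in full; the proofs are below) =====
def Claim_equal_column_words : Prop := ∀ (triplets : List String), Dom_column_words triplets → Spec_column_words triplets (column_words triplets)

-- ===== LEMMAS AND PROOFS =====

-- A's column j, as a list of chars
def pvCol (j : Nat) (ts : List String) : List Char :=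
  (ts.filter (fun tr => decide (PySem.Str.len tr > (j : Int)))).map
    (fun tr => (PySem.Str.pyGet? tr (j : Int)).getD ' ')

theorem pvFold_inv (ts : List String) (c : List Char × List Char × List Char) :
    ts.foldl
      (fun (c : List Char × List Char × List Char) t =>
        let l := t.toList
        let c0 := if l.length > 0 then c.1 ++ [(PySem.List.pyGet? l 0).getD ' '] else c.1
        let c1 := if l.length > 1 then c.2.1 ++ [(PySem.List.pyGet? l 1).getD ' '] else c.2.1
        let c2 := if l.length > 2 then c.2.2 ++ [(PySem.List.pyGet? l 2).getD ' '] else c.2.2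
        (c0, c1, c2)) c
    = (c.1 ++ pvCol 0 ts, c.2.1 ++ pvCol 1 ts, c.2.2 ++ pvCol 2 ts) := by
  induction ts generalizing c with
  | nil => simp [pvCol]
  | cons t ts ih =>
    simp only [List.foldl_cons, ih]
    obtain ⟨a, b, d⟩ := c
    simp only [pvCol, List.filter_cons, Prod.mk.injEq]
    refine ⟨?_, ?_, ?_⟩ <;>
      [by_cases h : 0 < t.length; by_cases h : 1 < t.length;
       by_cases h : 2 < t.length] <;>
      simp [h, PySem.List.pyGet?_of_nonneg]

-- ===== VERDICT (by name: the statement is the Claim_ definition above) =====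
theorem column_words_spec : Claim_equal_column_words := by
  intro triplets _
  unfold Spec_column_words column_words column_words_alt
  rw [pvFold_inv]
  have h3 : PySem.List.pyRange 0 3 1 = [0, 1, 2] := by decide
  simp [h3, pvCol]
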